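-- pv_equiv track=rewrite | github.com/Dan-Patterson/numpy_geometry | arcpro_npg/npg/npg_bool_ops.py | segment_classify
-- ===== SOURCE A (Python) =====
-- def segment_classify(all_seq, c_in, c_out, p_in, p_out):
--     """Classify the segments as to their type.
--
--     Parameters
--     ----------
--     all_seq : list of arrays
--         The sequences from clp and poly split at their intersection points.
--     c_in, c_out, p_in, p_out : arrays
--         `c` and `p` are the clp and poly in and out point ids.
--
--     Requires
--     --------
--     The inputs come from `polygon_overlay`.
--     """
--     in_c = set(c_in)
--     out_c = set(c_out)
--     in_p = set(p_in)
--     out_p = set(p_out)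
--     c_in_segs = []
--     c_out_segs = []
--     p_in_segs = []
--     p_out_segs = []
--     oth_segs = []  # -- clip polys because all ids are `on`
--     for i in all_seq:
--         if len(in_c) > 0:
--             if len(in_c.intersection(i)) > 0:
--                 c_in_segs.append(i)
--                 continue
--         if len(out_c) > 0:
--             if len(out_c.intersection(i)) > 0:
--                 c_out_segs.append(i)
--                 continue
--         if len(in_p) > 0:
--             if len(in_p.intersection(i)) > 0:
--                 p_in_segs.append(i)
--                 continue
--         if len(out_p) > 0:
--             if len(out_p.intersection(i)) > 0:
--                 p_out_segs.append(i)
--                 continue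
--         oth_segs.append(i)
--         # fix the above to class c_out
--     return c_in_segs, c_out_segs, p_in_segs, p_out_segs, oth_segs
-- ===== SOURCE B (Python) =====
-- def segment_classify(all_seq, c_in, c_out, p_in, p_out):
--     rank = {}
--     for ids, r in ((p_out, 3), (p_in, 2), (c_out, 1), (c_in, 0)):
--         for x in ids:
--             rank[x] = r
--     buckets = ([], [], [], [], [])
--     for seq in all_seq:
--         r = 4
--         for x in seq:
--             r = min(r, rank.get(x, 4))
--         buckets[r].append(seq)
--     return buckets
-- ===== Notes on version B (the rewrite author's own statement) =====
-- stated objective: idiomatic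
-- what changed: Replaces the four-way if/intersection cascade over four sets by a single id->priority dict (populated in reverse priority so higher-priority classes overwrite) and one min-of-ranks pass per sequence into an indexed bucket tuple.
import Mathlib
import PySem

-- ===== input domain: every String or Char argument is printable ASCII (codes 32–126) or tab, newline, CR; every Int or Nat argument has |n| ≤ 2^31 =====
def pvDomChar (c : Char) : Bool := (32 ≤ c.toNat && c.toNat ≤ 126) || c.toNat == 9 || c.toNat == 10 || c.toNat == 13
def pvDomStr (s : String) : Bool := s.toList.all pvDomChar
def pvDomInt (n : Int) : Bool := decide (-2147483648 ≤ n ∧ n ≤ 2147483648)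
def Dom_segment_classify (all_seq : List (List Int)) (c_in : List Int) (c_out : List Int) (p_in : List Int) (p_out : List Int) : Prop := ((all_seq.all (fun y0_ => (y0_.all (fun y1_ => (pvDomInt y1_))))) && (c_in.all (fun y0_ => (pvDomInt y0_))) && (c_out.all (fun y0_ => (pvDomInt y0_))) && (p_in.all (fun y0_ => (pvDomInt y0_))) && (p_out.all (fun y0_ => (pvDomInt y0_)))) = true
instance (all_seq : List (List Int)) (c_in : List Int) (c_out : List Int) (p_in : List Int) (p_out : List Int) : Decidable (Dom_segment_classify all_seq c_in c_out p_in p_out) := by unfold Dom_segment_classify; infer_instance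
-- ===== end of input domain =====

-- B replaces A's four-way set-intersection cascade by one id→priority dict plus a
-- min-of-ranks pass per sequence into indexed buckets (idiomatic, same output).

-- ===== PORT A =====
def segment_classify (all_seq : List (List Int)) (c_in : List Int) (c_out : List Int) (p_in : List Int) (p_out : List Int) : List (List Int) × List (List Int) × List (List Int) × List (List Int) × List (List Int) :=
  let in_c : PySem.Set Int := PySem.Set.ofList c_in
  let out_c : PySem.Set Int := PySem.Set.ofList c_out
  let in_p : PySem.Set Int := PySem.Set.ofList p_in
  let out_p : PySem.Set Int := PySem.Set.ofList p_out
  all_seq.foldl (fun st i =>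
    -- 'if len(s) > 0: if len(s.intersection(i)) > 0: append; continue' — the two
    -- nested ifs both fall through to the next check, so one conjunction is exact
    if PySem.Set.len in_c > 0 ∧ PySem.Set.len (PySem.Set.inter in_c i) > 0 then
      (st.1 ++ [i], st.2.1, st.2.2.1, st.2.2.2.1, st.2.2.2.2)
    else if PySem.Set.len out_c > 0 ∧ PySem.Set.len (PySem.Set.inter out_c i) > 0 then
      (st.1, st.2.1 ++ [i], st.2.2.1, st.2.2.2.1, st.2.2.2.2)
    else if PySem.Set.len in_p > 0 ∧ PySem.Set.len (PySem.Set.inter in_p i) > 0 then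
      (st.1, st.2.1, st.2.2.1 ++ [i], st.2.2.2.1, st.2.2.2.2)
    else if PySem.Set.len out_p > 0 ∧ PySem.Set.len (PySem.Set.inter out_p i) > 0 then
      (st.1, st.2.1, st.2.2.1, st.2.2.2.1 ++ [i], st.2.2.2.2)
    else
      (st.1, st.2.1, st.2.2.1, st.2.2.2.1, st.2.2.2.2 ++ [i]))
    ([], [], [], [], [])

-- ===== PORT B =====
def segment_classify_alt (all_seq : List (List Int)) (c_in : List Int) (c_out : List Int) (p_in : List Int) (p_out : List Int) : List (List Int) × List (List Int) × List (List Int) × List (List Int) × List (List Int) :=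
  let rank : PySem.Dict Int Int :=
    [(p_out, (3 : Int)), (p_in, (2 : Int)), (c_out, (1 : Int)), (c_in, (0 : Int))].foldl
      (fun d pr => pr.1.foldl (fun d x => d.insert x pr.2) d) PySem.Dict.empty
  all_seq.foldl (fun bk seq =>
    let r : Int := seq.foldl (fun r x => min r (rank.getD x 4)) 4
    -- buckets[r].append(seq): tuple indexing, ported as the index chain
    if r = 0 then (bk.1 ++ [seq], bk.2.1, bk.2.2.1, bk.2.2.2.1, bk.2.2.2.2)
    else if r = 1 then (bk.1, bk.2.1 ++ [seq], bk.2.2.1, bk.2.2.2.1, bk.2.2.2.2)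
    else if r = 2 then (bk.1, bk.2.1, bk.2.2.1 ++ [seq], bk.2.2.2.1, bk.2.2.2.2)
    else if r = 3 then (bk.1, bk.2.1, bk.2.2.1, bk.2.2.2.1 ++ [seq], bk.2.2.2.2)
    else (bk.1, bk.2.1, bk.2.2.1, bk.2.2.2.1, bk.2.2.2.2 ++ [seq]))
    ([], [], [], [], [])

-- ===== PRECONDITION & SPEC =====
def Spec_segment_classify (all_seq : List (List Int)) (c_in : List Int) (c_out : List Int) (p_in : List Int) (p_out : List Int) (out : List (List Int) × List (List Int) × List (List Int) × List (List Int) × List (List Int)) : Prop := out = segment_classify_alt all_seq c_in c_out p_in p_out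
instance (all_seq : List (List Int)) (c_in : List Int) (c_out : List Int) (p_in : List Int) (p_out : List Int) (out : List (List Int) × List (List Int) × List (List Int) × List (List Int) × List (List Int)) : Decidable (Spec_segment_classify all_seq c_in c_out p_in p_out out) := by unfold Spec_segment_classify; infer_instance

-- ===== CLAIM (what is proved, stated in full; the proofs are below) =====
def Claim_equal_segment_classify : Prop := ∀ (all_seq : List (List Int)) (c_in : List Int) (c_out : List Int) (p_in : List Int) (p_out : List Int), Dom_segment_classify all_seq c_in c_out p_in p_out → Spec_segment_classify all_seq c_in c_out p_in p_out (segment_classify all_seq c_in c_out p_in p_out)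

-- ===== LEMMAS AND PROOFS =====
def pvPrio (c_in c_out p_in p_out : List Int) (y : Int) : Int :=
  if y ∈ c_in then 0 else if y ∈ c_out then 1 else if y ∈ p_in then 2 else if y ∈ p_out then 3 else 4

def pvCls (c_in c_out p_in p_out : List Int) (i : List Int) : Int :=
  i.foldr (fun x r => min (pvPrio c_in c_out p_in p_out x) r) 4

theorem pvPrio_bounds (c_in c_out p_in p_out : List Int) (y : Int) :
    0 ≤ pvPrio c_in c_out p_in p_out y ∧ pvPrio c_in c_out p_in p_out y ≤ 4 := by
  unfold pvPrio; split_ifs <;> omega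

theorem pvCls_bounds (c_in c_out p_in p_out : List Int) (i : List Int) :
    0 ≤ pvCls c_in c_out p_in p_out i ∧ pvCls c_in c_out p_in p_out i ≤ 4 := by
  induction i with
  | nil => simp [pvCls]
  | cons x i ih =>
    have h := pvPrio_bounds c_in c_out p_in p_out x
    simp only [pvCls, List.foldr_cons] at ih ⊢
    omega

theorem rank_fold (xs : List Int) (d : PySem.Dict Int Int) (r y v : Int) :
    (xs.foldl (fun d x => d.insert x r) d).getD y v = if y ∈ xs then r else d.getD y v := by
  induction xs generalizing d with
  | nil => simp
  | cons x xs ih =>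
    simp only [List.foldl_cons, ih, PySem.Dict.getD_insert, List.mem_cons]
    split_ifs <;> simp_all

theorem rank_getD (c_in c_out p_in p_out : List Int) (y : Int) :
    (([(p_out, (3 : Int)), (p_in, (2 : Int)), (c_out, (1 : Int)), (c_in, (0 : Int))].foldl
      (fun d pr => pr.1.foldl (fun d x => d.insert x pr.2) d) PySem.Dict.empty).getD y 4)
    = pvPrio c_in c_out p_in p_out y := by
  simp only [List.foldl_cons, List.foldl_nil, rank_fold, PySem.Dict.getD_empty, pvPrio]

theorem foldl_min (c_in c_out p_in p_out : List Int) (i : List Int) (m : Int) (hm : m ≤ 4) :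
    i.foldl (fun r x => min r (pvPrio c_in c_out p_in p_out x)) m
      = min m (pvCls c_in c_out p_in p_out i) := by
  induction i generalizing m with
  | nil => simp [pvCls]; omega
  | cons x i ih =>
    have h := pvPrio_bounds c_in c_out p_in p_out x
    simp only [List.foldl_cons, pvCls, List.foldr_cons] at *
    rw [ih _ (by omega)]
    omega

theorem condA (c : List Int) (i : List Int) :
    ((0 < List.length (PySem.Set.ofList c) ∧
      0 < List.length (PySem.Set.inter (PySem.Set.ofList c) i))
      ↔ ∃ x ∈ i, x ∈ c) := by
  constructor
  · rintro ⟨-, h2⟩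
    have : (PySem.Set.inter (PySem.Set.ofList c) i) ≠ [] := by
      intro h; rw [h] at h2; simp at h2
    obtain ⟨x, hx⟩ := List.exists_mem_of_ne_nil _ this
    rw [PySem.Set.mem_inter] at hx
    exact ⟨x, hx.2, (PySem.Set.mem_ofList _ _).mp hx.1⟩
  · rintro ⟨x, hxi, hxc⟩
    have hx : x ∈ PySem.Set.inter (PySem.Set.ofList c) i :=
      (PySem.Set.mem_inter _ _ _).mpr ⟨(PySem.Set.mem_ofList _ _).mpr hxc, hxi⟩
    have h1 : x ∈ PySem.Set.ofList c := (PySem.Set.mem_ofList _ _).mpr hxc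
    constructor
    · exact_mod_cast List.length_pos_of_mem h1
    · exact_mod_cast List.length_pos_of_mem hx

theorem pvCls_cons (c_in c_out p_in p_out : List Int) (x : Int) (i : List Int) :
    pvCls c_in c_out p_in p_out (x :: i)
      = min (pvPrio c_in c_out p_in p_out x) (pvCls c_in c_out p_in p_out i) := rfl

-- characterization: pvCls equals the exists-chain
theorem pvCls_eq_chain (c_in c_out p_in p_out : List Int) (i : List Int) :
    pvCls c_in c_out p_in p_out i =
      (if ∃ x ∈ i, x ∈ c_in then 0
       else if ∃ x ∈ i, x ∈ c_out then 1
       else if ∃ x ∈ i, x ∈ p_in then 2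
       else if ∃ x ∈ i, x ∈ p_out then 3 else 4) := by
  induction i with
  | nil => simp [pvCls]
  | cons x i ih =>
    rw [pvCls_cons, ih]
    simp only [List.mem_cons, exists_eq_or_imp]
    unfold pvPrio
    by_cases h1 : x ∈ c_in <;> by_cases h2 : x ∈ c_out <;> by_cases h3 : x ∈ p_in <;>
      by_cases h4 : x ∈ p_out <;>
      by_cases e1 : (∃ y ∈ i, y ∈ c_in) <;> by_cases e2 : (∃ y ∈ i, y ∈ c_out) <;>
      by_cases e3 : (∃ y ∈ i, y ∈ p_in) <;> by_cases e4 : (∃ y ∈ i, y ∈ p_out) <;>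
      simp only [h1, h2, h3, h4, e1, e2, e3, e4, if_true, if_false, or_true, or_false] <;> omega

-- ===== VERDICT =====
theorem segment_classify_spec : Claim_equal_segment_classify := by
  intro all_seq c_in c_out p_in p_out _
  unfold Spec_segment_classify
  simp only [segment_classify, segment_classify_alt]
  apply List.foldl_ext
  intro st i _
  simp only [rank_getD]
  have hcls := pvCls_bounds c_in c_out p_in p_out i
  rw [foldl_min c_in c_out p_in p_out i 4 (by omega), min_eq_right hcls.2, pvCls_eq_chain]
  by_cases e1 : (∃ x ∈ i, x ∈ c_in) <;> by_cases e2 : (∃ x ∈ i, x ∈ c_out) <;>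
    by_cases e3 : (∃ x ∈ i, x ∈ p_in) <;> by_cases e4 : (∃ x ∈ i, x ∈ p_out) <;>
    simp [condA, e1, e2, e3, e4]
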